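-- pv_equiv track=rewrite | github.com/Ravi-0412/DSA-Program-And-Notes | Prefix Sum/2420. Find All Good Indices.py | goodIndices
-- ===== SOURCE A (Python) =====
-- from typing import List
--
-- def goodIndices(a: List[int], k: int) -> List[int]:
--     n, ans= len(a) ,[]
--     dp1 , dp2= [1]*(n+1), [1]*(n+1)
--     for i in range(1,n):
--         if a[i-1]>=a[i]:  dp1[i]= dp1[i-1]+1
--
--     for i in range(n-2,-1,-1):
--         if a[i]<=a[i+1]:  dp2[i]= dp2[i+1]+1
--
--     for i in range(k,n-k):
--         if dp1[i-1]>=k and dp2[i+1]>=k: ans+= [i]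
--     return ans
-- ===== SOURCE B (Python) =====
-- from typing import List
--
-- def goodIndices(a: List[int], k: int) -> List[int]:
--     n = len(a)
--     return [i for i in range(k, n - k)
--             if all(a[j] >= a[j + 1] for j in range(i - k, i - 1))
--             and all(a[j] <= a[j + 1] for j in range(i + 1, i + k))]
-- ===== Notes on version B (the rewrite author's own statement) =====
-- stated objective: simpler
-- what changed: Dropped the dp1/dp2 prefix/suffix run-length tables; B is a single comprehension that directly verifies each candidate's left window is non-increasing and right window is non-decreasing.
import Mathlib
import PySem

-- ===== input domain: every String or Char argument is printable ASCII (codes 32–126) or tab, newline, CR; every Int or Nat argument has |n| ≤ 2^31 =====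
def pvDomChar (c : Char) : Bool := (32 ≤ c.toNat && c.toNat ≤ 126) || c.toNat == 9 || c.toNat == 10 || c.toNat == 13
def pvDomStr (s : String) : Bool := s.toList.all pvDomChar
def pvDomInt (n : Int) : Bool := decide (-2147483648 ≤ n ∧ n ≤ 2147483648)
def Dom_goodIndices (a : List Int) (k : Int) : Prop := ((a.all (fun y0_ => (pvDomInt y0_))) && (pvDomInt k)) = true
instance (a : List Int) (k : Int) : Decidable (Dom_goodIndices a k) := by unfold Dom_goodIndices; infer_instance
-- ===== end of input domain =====

-- B replaces A's dp1/dp2 run-length tables by a direct per-candidate window check (simpler: one comprehension).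

-- ===== PORT A =====
-- a[i] with an Int index; on every access either port makes under Pre_ the index is in range,
-- so the default 0 is never returned (exact for Python's indexing there).
def pvIdx (xs : List Int) (i : Int) : Int := PySem.List.pyGetD xs i 0

def goodIndices (a : List Int) (k : Int) : List Int :=
  let n : Int := a.length
  let dp1 : List Int := List.replicate (a.length + 1) 1
  let dp2 : List Int := List.replicate (a.length + 1) 1
  let dp1 := (PySem.List.pyRange 1 n 1).foldl
    (fun d i => if pvIdx a (i-1) ≥ pvIdx a i then PySem.List.pySetD d i (pvIdx d (i-1) + 1) else d) dp1
  let dp2 := (PySem.List.pyRange (n-2) (-1) (-1)).foldl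
    (fun d i => if pvIdx a i ≤ pvIdx a (i+1) then PySem.List.pySetD d i (pvIdx d (i+1) + 1) else d) dp2
  (PySem.List.pyRange k (n-k) 1).foldl
    (fun ans i => if pvIdx dp1 (i-1) ≥ k ∧ pvIdx dp2 (i+1) ≥ k then ans ++ [i] else ans) []

-- ===== PORT B =====
def goodIndices_alt (a : List Int) (k : Int) : List Int :=
  let n : Int := a.length
  (PySem.List.pyRange k (n - k) 1).filter (fun i =>
    ((PySem.List.pyRange (i - k) (i - 1) 1).all (fun j => pvIdx a j ≥ pvIdx a (j+1))) &&
    ((PySem.List.pyRange (i + 1) (i + k) 1).all (fun j => pvIdx a j ≤ pvIdx a (j+1))))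

-- ===== PRECONDITION & SPEC =====
-- Pre_ excludes exactly k < 0, on which A always raises IndexError (the last loop indexes dp past its end).
def Pre_goodIndices (a : List Int) (k : Int) : Prop := 0 ≤ k
instance (a : List Int) (k : Int) : Decidable (Pre_goodIndices a k) := by unfold Pre_goodIndices; infer_instance
def pvWitness_goodIndices : List Int × Int := ([2, 1, 1, 1, 3, 4, 1], 2)

def Spec_goodIndices (a : List Int) (k : Int) (out : List Int) : Prop := out = goodIndices_alt a k
instance (a : List Int) (k : Int) (out : List Int) : Decidable (Spec_goodIndices a k out) := by unfold Spec_goodIndices; infer_instance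

-- ===== CLAIM (what is proved, stated in full; the proofs are below) =====
def Claim_equal_goodIndices : Prop := ∀ (a : List Int) (k : Int), Dom_goodIndices a k → Pre_goodIndices a k → Spec_goodIndices a k (goodIndices a k)

-- ===== LEMMAS AND PROOFS =====

-- length of the non-increasing run of a ending at index j (the final value of dp1[j])
def runL (a : List Int) : ℕ → Int
  | 0 => 1
  | j+1 => if pvIdx a j ≥ pvIdx a (j+1) then runL a j + 1 else 1

-- length of the non-decreasing run of a starting at index j (the final value of dp2[j])
def runR (a : List Int) (j : ℕ) : Int :=
  if a.length ≤ j + 1 then 1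
  else if pvIdx a j ≤ pvIdx a (j+1) then runR a (j+1) + 1 else 1
termination_by a.length - j

-- the loop bodies of A's two dp loops (named so the invariants below can speak about them)
def step1 (a : List Int) (d : List Int) (i : Int) : List Int :=
  if pvIdx a (i-1) ≥ pvIdx a i then PySem.List.pySetD d i (pvIdx d (i-1) + 1) else d
def step2 (a : List Int) (d : List Int) (i : Int) : List Int :=
  if pvIdx a i ≤ pvIdx a (i+1) then PySem.List.pySetD d i (pvIdx d (i+1) + 1) else d

theorem runL_pos (a : List Int) (j : ℕ) : 1 ≤ runL a j := by
  induction j with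
  | zero => simp [runL]
  | succ j ih => unfold runL; split <;> omega

theorem runR_pos (a : List Int) (j : ℕ) : 1 ≤ runR a j := by
  unfold runR
  split
  · omega
  · have := runR_pos a (j+1)
    split <;> omega
termination_by a.length - j

theorem runR_base (a : List Int) (j : ℕ) (h : a.length ≤ j + 1) : runR a j = 1 := by
  unfold runR; simp [h]

theorem runL_ge (a : List Int) (j : ℕ) (c : Int) (hc : 1 ≤ c) :
    c ≤ runL a j ↔ (c ≤ (j : Int) + 1 ∧
      ∀ t : ℕ, (j : Int) - c < t → t < j → pvIdx a t ≥ pvIdx a (t+1)) := by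
  induction j generalizing c with
  | zero =>
    simp only [runL]
    constructor
    · intro h
      exact ⟨by omega, fun t _ ht2 => absurd ht2 (by omega)⟩
    · rintro ⟨h1, _⟩; omega
  | succ j ih =>
    unfold runL
    split
    · rename_i hcmp
      by_cases hc1 : c = 1
      · subst hc1
        have := runL_pos a j
        constructor
        · intro _
          refine ⟨by push_cast; omega, fun t ht1 ht2 => ?_⟩
          push_cast at ht1; omega
        · intro _; omega
      · have hc2 : 2 ≤ c := by omega
        have hstep : c ≤ runL a j + 1 ↔ c - 1 ≤ runL a j := by omega
        rw [hstep, ih (c-1) (by omega)]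
        constructor
        · rintro ⟨h1, h2⟩
          refine ⟨by push_cast; omega, fun t ht1 ht2 => ?_⟩
          by_cases htj : t = j
          · subst htj; exact hcmp
          · exact h2 t (by push_cast at ht1 ⊢; omega) (by omega)
        · rintro ⟨h1, h2⟩
          refine ⟨by push_cast at h1; omega, fun t ht1 ht2 => ?_⟩
          exact h2 t (by push_cast at ht1 ⊢; omega) (by omega)
    · rename_i hcmp
      constructor
      · intro h
        have hc1 : c = 1 := by omega
        subst hc1
        refine ⟨by push_cast; omega, fun t ht1 ht2 => ?_⟩
        push_cast at ht1; omega
      · rintro ⟨h1, h2⟩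
        by_cases hc1 : c = 1
        · omega
        · exact absurd (h2 j (by push_cast; omega) (by omega)) hcmp

theorem runR_ge (a : List Int) (j : ℕ) (c : Int) (hc : 1 ≤ c) (hj : j + 1 ≤ a.length) :
    c ≤ runR a j ↔ (c ≤ (a.length : Int) - j ∧
      ∀ t : ℕ, j ≤ t → (t : Int) < j + c - 1 → pvIdx a t ≤ pvIdx a (t+1)) := by
  unfold runR
  split
  · rename_i h
    constructor
    · intro hle
      refine ⟨by omega, fun t ht1 ht2 => ?_⟩
      omega
    · rintro ⟨h1, _⟩; omega
  · rename_i h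
    split
    · rename_i hcmp
      by_cases hc1 : c = 1
      · subst hc1
        have := runR_pos a (j+1)
        constructor
        · intro _
          exact ⟨by omega, fun t ht1 ht2 => by omega⟩
        · intro _; omega
      · have hc2 : 2 ≤ c := by omega
        have hstep : c ≤ runR a (j+1) + 1 ↔ c - 1 ≤ runR a (j+1) := by omega
        rw [hstep, runR_ge a (j+1) (c-1) (by omega) (by omega)]
        constructor
        · rintro ⟨h1, h2⟩
          refine ⟨by push_cast at h1 ⊢; omega, fun t ht1 ht2 => ?_⟩
          by_cases htj : t = j
          · subst htj; exact hcmp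
          · exact h2 t (by omega) (by push_cast at ht2 ⊢; omega)
        · rintro ⟨h1, h2⟩
          refine ⟨by push_cast at h1 ⊢; omega, fun t ht1 ht2 => ?_⟩
          exact h2 t (by omega) (by push_cast at ht2 ⊢; omega)
    · rename_i hcmp
      constructor
      · intro hle
        have hc1 : c = 1 := by omega
        subst hc1
        exact ⟨by omega, fun t ht1 ht2 => by omega⟩
      · rintro ⟨h1, h2⟩
        by_cases hc1 : c = 1
        · omega
        · exact absurd (h2 j (by omega) (by omega)) hcmp
termination_by a.length - j

theorem dp1_inv (a : List Int) (m : ℕ) (hm : 1 ≤ m) (hn : m ≤ a.length) :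
    ((PySem.List.pyRange 1 (m : Int) 1).foldl (step1 a) (List.replicate (a.length + 1) 1)).length
      = a.length + 1 ∧
    ∀ j : ℕ, j ≤ a.length →
      ((PySem.List.pyRange 1 (m : Int) 1).foldl (step1 a) (List.replicate (a.length + 1) 1)).getD j 0
        = if j < m then runL a j else 1 := by
  induction m, hm using Nat.le_induction with
  | base =>
    rw [PySem.List.pyRange_one_eq_nil (by norm_num)]
    refine ⟨by simp, fun j hj => ?_⟩
    have h1 : (List.replicate (a.length+1) (1:Int)).getD j 0 = 1 := by
      rw [List.getD_eq_getElem?_getD]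
      simp [Nat.lt_succ_of_le hj]
    simp only [List.foldl_nil, h1]
    split
    · rename_i h
      have hj0 : j = 0 := by omega
      subst hj0
      simp [runL]
    · rfl
  | succ m hm ih =>
    have ih' := ih (by omega)
    obtain ⟨hlen, hval⟩ := ih'
    have hsplit : PySem.List.pyRange 1 ((m:ℕ)+1 : ℕ) 1
        = PySem.List.pyRange 1 (m : Int) 1 ++ [(m : Int)] := by
      push_cast
      exact PySem.List.pyRange_one_succ_right (by exact_mod_cast hm)
    rw [hsplit, List.foldl_append]
    set D := (PySem.List.pyRange 1 (m : Int) 1).foldl (step1 a) (List.replicate (a.length + 1) 1) with hD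
    simp only [List.foldl_cons, List.foldl_nil]
    have hm1 : ((m:Int) - 1) = ((m-1 : ℕ) : Int) := by omega
    have hgm1 : pvIdx D ((m:Int)-1) = runL a (m-1) := by
      rw [hm1]
      show PySem.List.pyGetD D ((m-1 : ℕ) : Int) 0 = _
      rw [PySem.List.pyGetD_natCast]
      rw [hval (m-1) (by omega), if_pos (by omega)]
    unfold step1
    split
    · rename_i hcmp
      rw [hgm1]
      rw [show ((m:Int)) = ((m:ℕ) : Int) from rfl, PySem.List.pySetD_natCast]
      refine ⟨by simp [hlen], fun j hj => ?_⟩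
      by_cases hjm : j = m
      · subst hjm
        rw [List.getD_eq_getElem?_getD, List.getElem?_set_self (by omega), Option.getD_some,
            if_pos (by omega)]
        have hm1' : j = (j - 1) + 1 := by omega
        have hia : ((j-1:ℕ) : Int) + 1 = (j : Int) := by omega
        have hrs : runL a j
            = if pvIdx a ((j-1:ℕ):Int) ≥ pvIdx a (((j-1:ℕ):Int)+1) then runL a (j-1) + 1 else 1 := by
          conv_lhs => rw [hm1']
          simp [runL]
        rw [hrs, if_pos (by rw [hia, ← hm1]; exact hcmp)]
      · rw [List.getD_eq_getElem?_getD, List.getElem?_set_ne (by omega), ← List.getD_eq_getElem?_getD,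
            hval j hj]
        by_cases h1 : j < m
        · rw [if_pos h1, if_pos (by omega)]
        · rw [if_neg h1, if_neg (by omega)]
    · rename_i hcmp
      refine ⟨hlen, fun j hj => ?_⟩
      rw [hval j hj]
      by_cases hjm : j = m
      · subst hjm
        rw [if_neg (by omega), if_pos (by omega)]
        have hm1' : j = (j - 1) + 1 := by omega
        have hia : ((j-1:ℕ) : Int) + 1 = (j : Int) := by omega
        have hrs : runL a j
            = if pvIdx a ((j-1:ℕ):Int) ≥ pvIdx a (((j-1:ℕ):Int)+1) then runL a (j-1) + 1 else 1 := by
          conv_lhs => rw [hm1']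
          simp [runL]
        rw [hrs, if_neg (by rw [hia, ← hm1]; exact hcmp)]
      · by_cases h1 : j < m
        · rw [if_pos h1, if_pos (by omega)]
        · rw [if_neg h1, if_neg (by omega)]

theorem dp2_inv (a : List Int) (t : Int) (ht : -1 ≤ t) (ht2 : t ≤ (a.length : Int) - 2)
    (D : List Int) (hlen : D.length = a.length + 1)
    (hval : ∀ j : ℕ, j ≤ a.length → D.getD j 0 = if t < (j:Int) then runR a j else 1) :
    ((PySem.List.pyRange t (-1) (-1)).foldl (step2 a) D).length = a.length + 1 ∧
    ∀ j : ℕ, j ≤ a.length →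
      ((PySem.List.pyRange t (-1) (-1)).foldl (step2 a) D).getD j 0 = runR a j := by
  by_cases h0 : t = -1
  · subst h0
    rw [PySem.List.pyRange_neg_one_eq_nil (by omega)]
    simp only [List.foldl_nil]
    exact ⟨hlen, fun j hj => by rw [hval j hj, if_pos (by omega)]⟩
  · have ht0 : 0 ≤ t := by omega
    rw [PySem.List.pyRange_neg_one_cons (by omega), List.foldl_cons]
    have htn : t.toNat + 1 ≤ a.length := by omega
    have hcast : ((t.toNat : ℕ) : Int) = t := Int.toNat_of_nonneg ht0
    have hg : pvIdx D (t+1) = runR a (t.toNat + 1) := by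
      show PySem.List.pyGetD D (t+1) 0 = _
      rw [show (t+1 : Int) = ((t.toNat+1 : ℕ) : Int) from by omega, PySem.List.pyGetD_natCast,
          hval (t.toNat+1) htn, if_pos (by omega)]
    have hrun : runR a t.toNat = if pvIdx a t ≤ pvIdx a (t+1) then runR a (t.toNat+1) + 1 else 1 := by
      conv_lhs => unfold runR
      rw [if_neg (by omega)]
      rw [hcast]

    have h1len : (step2 a D t).length = a.length + 1 := by
      unfold step2
      split
      · rw [PySem.List.pySetD_of_nonneg _ _ ht0]; simp [hlen]
      · exact hlen
    have h1val : ∀ j : ℕ, j ≤ a.length →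
        (step2 a D t).getD j 0 = if t - 1 < (j:Int) then runR a j else 1 := by
      intro j hj
      unfold step2
      split
      · rename_i hcmp
        rw [PySem.List.pySetD_of_nonneg _ _ ht0]
        by_cases hjt : (j:Int) = t
        · have hjt' : t.toNat = j := by omega
          rw [List.getD_eq_getElem?_getD, hjt', List.getElem?_set_self (by omega),
              Option.getD_some, if_pos (by omega), hg, ← hjt']
          rw [hrun, if_pos hcmp]
        · rw [List.getD_eq_getElem?_getD, List.getElem?_set_ne (by omega),
              ← List.getD_eq_getElem?_getD, hval j hj]
          by_cases h1 : t < (j:Int)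
          · rw [if_pos h1, if_pos (by omega)]
          · rw [if_neg h1, if_neg (by omega)]
      · rename_i hcmp
        rw [hval j hj]
        by_cases hjt : (j:Int) = t
        · have hjt' : t.toNat = j := by omega
          rw [if_neg (by omega), if_pos (by omega), ← hjt', hrun, if_neg hcmp]
        · by_cases h1 : t < (j:Int)
          · rw [if_pos h1, if_pos (by omega)]
          · rw [if_neg h1, if_neg (by omega)]
    exact dp2_inv a (t-1) (by omega) (by omega) (step2 a D t) h1len h1val
termination_by (t+1).toNat
decreasing_by omega

-- ===== VERDICT (by name: the statement is the Claim_ definition above) =====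
theorem goodIndices_spec : Claim_equal_goodIndices := by
  intro a k _ hpre
  have hkpre : (0:Int) ≤ k := hpre
  unfold Spec_goodIndices
  have hgA : goodIndices a k = (PySem.List.pyRange k ((a.length:Int) - k) 1).foldl
      (fun ans i => if pvIdx ((PySem.List.pyRange 1 (a.length:Int) 1).foldl (step1 a) (List.replicate (a.length+1) 1)) (i-1) ≥ k
          ∧ pvIdx ((PySem.List.pyRange ((a.length:Int)-2) (-1) (-1)).foldl (step2 a) (List.replicate (a.length+1) 1)) (i+1) ≥ k
        then ans ++ [i] else ans) [] := rfl
  have hgB : goodIndices_alt a k = (PySem.List.pyRange k ((a.length:Int) - k) 1).filter (fun i =>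
    ((PySem.List.pyRange (i - k) (i - 1) 1).all (fun j => pvIdx a j ≥ pvIdx a (j+1))) &&
    ((PySem.List.pyRange (i + 1) (i + k) 1).all (fun j => pvIdx a j ≤ pvIdx a (j+1)))) := rfl
  rw [hgA, hgB, PySem.List.foldl_append_ite_eq_filter, List.nil_append]
  apply List.filter_congr
  intro i hi
  rw [PySem.List.mem_pyRange_one] at hi
  obtain ⟨hik, hikn⟩ := hi
  have hlen1 : 1 ≤ a.length := by omega
  obtain ⟨hL1, hV1⟩ := dp1_inv a a.length hlen1 (le_refl _)
  have hrepl : ∀ j : ℕ, j ≤ a.length → (List.replicate (a.length+1) (1:Int)).getD j 0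
      = if (a.length:Int) - 2 < (j:Int) then runR a j else 1 := by
    intro j hj
    have h1 : (List.replicate (a.length+1) (1:Int)).getD j 0 = 1 := by
      rw [List.getD_eq_getElem?_getD]
      simp [Nat.lt_succ_of_le hj]
    rw [h1]
    split
    · rw [runR_base a j (by omega)]
    · rfl
  obtain ⟨hL2, hV2⟩ := dp2_inv a ((a.length:Int)-2) (by omega) (by omega) _ (by simp) hrepl
  set D1 := (PySem.List.pyRange 1 (a.length:Int) 1).foldl (step1 a) (List.replicate (a.length+1) 1) with hD1
  set D2 := (PySem.List.pyRange ((a.length:Int)-2) (-1) (-1)).foldl (step2 a) (List.replicate (a.length+1) 1) with hD2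
  rw [Bool.eq_iff_iff]
  simp only [decide_eq_true_eq, Bool.and_eq_true, List.all_eq_true]
  apply and_congr
  · -- left window
    by_cases hk0 : k = 0
    · subst hk0
      constructor
      · intro _ j hj
        rw [PySem.List.mem_pyRange_one] at hj
        omega
      · intro _
        by_cases hi0 : i = 0
        · subst hi0
          have hne : D1 ≠ [] := by
            intro h; rw [h] at hL1; simp at hL1
          show (0:Int) ≤ pvIdx D1 (0-1)
          rw [show ((0:Int)-1) = -1 from by omega]
          have he : pvIdx D1 (-1) = D1.getLast hne := PySem.List.pyGetD_neg_one D1 0 hne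
          have h3 : D1.getD a.length 0 = 1 := by
            rw [hV1 a.length (le_refl _), if_neg (by omega)]
          rw [List.getD_eq_getElem?_getD, List.getElem?_eq_getElem (by omega),
              Option.getD_some] at h3
          rw [he, List.getLast_eq_getElem]
          have h4 : D1[D1.length - 1]'(by omega) = D1[a.length]'(by omega) := by
            congr 1
            omega
          rw [h4, h3]
          norm_num
        · have hj1 : (i-1) = (((i-1).toNat : ℕ) : Int) := by omega
          show (0:Int) ≤ pvIdx D1 (i-1)
          rw [hj1]
          show (0:Int) ≤ PySem.List.pyGetD D1 (((i-1).toNat : ℕ) : Int) 0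
          rw [PySem.List.pyGetD_natCast, hV1 (i-1).toNat (by omega)]
          have := runL_pos a (i-1).toNat
          split <;> omega
    · have hk1 : 1 ≤ k := by omega
      have hj1 : (i-1) = (((i-1).toNat : ℕ) : Int) := by omega
      have e1 : pvIdx D1 (i-1) = runL a (i-1).toNat := by
        conv_lhs => rw [hj1]
        show PySem.List.pyGetD D1 (((i-1).toNat : ℕ) : Int) 0 = _
        rw [PySem.List.pyGetD_natCast, hV1 (i-1).toNat (by omega), if_pos (by omega)]
      show pvIdx D1 (i-1) ≥ k ↔ _
      rw [ge_iff_le, e1, runL_ge a (i-1).toNat k hk1]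
      constructor
      · rintro ⟨-, h2⟩ j hj
        rw [PySem.List.mem_pyRange_one] at hj
        have := h2 j.toNat (by omega) (by omega)
        rw [show ((j.toNat : ℕ) : Int) = j from by omega] at this
        exact this
      · intro h
        refine ⟨by omega, fun t ht1 ht2 => ?_⟩
        have := h (t : Int) (PySem.List.mem_pyRange_one.mpr ⟨by omega, by omega⟩)
        exact this
  · -- right window
    have hj2 : (i+1) = (((i+1).toNat : ℕ) : Int) := by omega
    have e2 : pvIdx D2 (i+1) = runR a (i+1).toNat := by
      conv_lhs => rw [hj2]
      show PySem.List.pyGetD D2 (((i+1).toNat : ℕ) : Int) 0 = _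
      rw [PySem.List.pyGetD_natCast, hV2 (i+1).toNat (by omega)]
    by_cases hk0 : k = 0
    · subst hk0
      constructor
      · intro _ j hj
        rw [PySem.List.mem_pyRange_one] at hj
        omega
      · intro _
        show (0:Int) ≤ pvIdx D2 (i+1)
        rw [e2]
        have := runR_pos a (i+1).toNat
        omega
    · have hk1 : 1 ≤ k := by omega
      show pvIdx D2 (i+1) ≥ k ↔ _
      rw [ge_iff_le, e2, runR_ge a (i+1).toNat k hk1 (by omega)]
      constructor
      · rintro ⟨-, h2⟩ j hj
        rw [PySem.List.mem_pyRange_one] at hj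
        have := h2 j.toNat (by omega) (by omega)
        rw [show ((j.toNat : ℕ) : Int) = j from by omega] at this
        exact this
      · intro h
        refine ⟨by omega, fun t ht1 ht2 => ?_⟩
        have := h (t : Int) (PySem.List.mem_pyRange_one.mpr ⟨by omega, by omega⟩)
        exact this
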